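-- pv_equiv track=rewrite | github.com/dancic747/rosalind_info | ch01/BA1f.py | find_min_skew_positions
-- ===== SOURCE A (Python) =====
-- def compute_skew(text):
--     countC=0
--     countG=0
--     for i in range(len(text)):
--         if text[i]=='C': countC+=1
--         if text[i]=='G': countG+=1
--     skew=countG-countC
--     return skew
--
-- def find_min_skew_positions(text):
--     skew=[]
--     min_skew_positions=[]
--     for i in range(len(text)):
--         skew.append(compute_skew(text[:i:1]))
--     min_skew=min(skew)
--     for i in range(len(skew)):
--         if (skew[i]==min_skew): min_skew_positions.append(i)
--     return min_skew_positions
-- ===== SOURCE B (Python) =====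
-- def find_min_skew_positions(text):
--     # single pass: running prefix skew, tracking current minimum and its positions
--     cur = 0
--     best = 0
--     positions = []
--     for i, ch in enumerate(text):
--         if cur < best:
--             best = cur
--             positions = [i]
--         elif cur == best:
--             positions.append(i)
--         cur += (ch == 'G') - (ch == 'C')
--     return positions
-- ===== Notes on version B (the rewrite author's own statement) =====
-- stated objective: faster
-- what changed: A recomputes the skew of every prefix from scratch and then rescans the list for the minimum; B makes one pass carrying the running prefix skew together with the current minimum and the list of its positions.
-- crash fix: On the empty string A raises ValueError (min of an empty list); B returns []. — e.g. on find_min_skew_positions(""): A raises ValueError, B returns []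
import Mathlib
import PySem

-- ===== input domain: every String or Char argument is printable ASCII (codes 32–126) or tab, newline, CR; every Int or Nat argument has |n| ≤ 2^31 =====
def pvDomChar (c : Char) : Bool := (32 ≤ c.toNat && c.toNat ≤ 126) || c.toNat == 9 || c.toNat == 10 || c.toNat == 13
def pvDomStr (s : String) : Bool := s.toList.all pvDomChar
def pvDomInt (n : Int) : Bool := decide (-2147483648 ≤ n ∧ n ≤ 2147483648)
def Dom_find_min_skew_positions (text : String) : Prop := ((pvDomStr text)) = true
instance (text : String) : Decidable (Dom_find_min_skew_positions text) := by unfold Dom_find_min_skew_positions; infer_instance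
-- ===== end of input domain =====

-- B replaces A's quadratic "recount every prefix, then rescan for the minimum" by one pass
-- that carries the running prefix skew together with the current minimum and its positions.

-- ===== PORT A =====
def compute_skew (text : String) : Int :=
  let cs := text.toList
  let counts := (PySem.List.pyRange 0 (PySem.Str.len text)).foldl
    (fun (p : Int × Int) i =>
      let c := PySem.List.pyGetD cs i ' '   -- text[i]; i is always in range inside this loop, so exact
      (if c = 'C' then p.1 + 1 else p.1, if c = 'G' then p.2 + 1 else p.2))
    (0, 0)
  counts.2 - counts.1

def find_min_skew_positions (text : String) : List Int :=
  let cs := text.toList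
  let skew := (PySem.List.pyRange 0 (PySem.Str.len text)).map
    (fun i => compute_skew (String.ofList ((PySem.List.slice? cs none (some i) 1).getD [])))  -- text[:i:1]; step 1, never none
  match PySem.List.min? skew (fun x => x) with
  | none => []   -- Python: min([]) raises ValueError here; excluded by Pre_
  | some m =>
    (PySem.List.pyRange 0 ((skew.length : Int))).foldl
      (fun acc i => if PySem.List.pyGetD skew i 0 = m then acc ++ [i] else acc) []

-- ===== PORT B =====
def find_min_skew_positions_alt (text : String) : List Int :=
  ((PySem.List.enumerate text.toList 0).foldl
    (fun (st : Int × Int × List Int) p =>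
      let bp :=
        if st.1 < st.2.1 then (st.1, [p.1])
        else if st.1 = st.2.1 then (st.2.1, st.2.2 ++ [p.1])
        else st.2
      (st.1 + ((if p.2 = 'G' then (1:Int) else 0) - (if p.2 = 'C' then 1 else 0)), bp))
    (0, 0, [])).2.2

-- ===== PRECONDITION & SPEC =====
-- Pre_ excludes only the empty string, on which A's min([]) raises ValueError.
def Pre_find_min_skew_positions (text : String) : Prop := text.toList ≠ []
instance (text : String) : Decidable (Pre_find_min_skew_positions text) := by unfold Pre_find_min_skew_positions; infer_instance
def pvWitness_find_min_skew_positions : String := "GAGCCTACG"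

-- On the empty string A raises ValueError (min of an empty list) while B returns [].
def Raises_find_min_skew_positions (text : String) : Prop := text.toList = []
instance (text : String) : Decidable (Raises_find_min_skew_positions text) := by unfold Raises_find_min_skew_positions; infer_instance
def pvRaiseWitness_find_min_skew_positions : String := ""
def pvRaiseWitnessOut_find_min_skew_positions : List Int := []

def Spec_find_min_skew_positions (text : String) (out : List Int) : Prop := out = find_min_skew_positions_alt text
instance (text : String) (out : List Int) : Decidable (Spec_find_min_skew_positions text out) := by unfold Spec_find_min_skew_positions; infer_instance

-- ===== CLAIM (what is proved, stated in full; the proofs are below) =====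
def Claim_equal_find_min_skew_positions : Prop := ∀ (text : String), Dom_find_min_skew_positions text → Pre_find_min_skew_positions text → Spec_find_min_skew_positions text (find_min_skew_positions text)
def Claim_raises_find_min_skew_positions : Prop := (∀ (text : String), Dom_find_min_skew_positions text → Raises_find_min_skew_positions text → ¬ Pre_find_min_skew_positions text) ∧ (Dom_find_min_skew_positions (pvRaiseWitness_find_min_skew_positions) ∧ Raises_find_min_skew_positions (pvRaiseWitness_find_min_skew_positions) ∧ find_min_skew_positions_alt (pvRaiseWitness_find_min_skew_positions) = pvRaiseWitnessOut_find_min_skew_positions)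

-- ===== LEMMAS AND PROOFS =====

-- per-character skew contribution, literally B's increment expression
def pvDlt (c : Char) : Int := (if c = 'G' then (1:Int) else 0) - (if c = 'C' then 1 else 0)

-- skew of a whole string
def pvSk (l : List Char) : Int := (l.map pvDlt).sum

-- the successive prefix-skew values along a string, starting from a running value
def pvVals : Int → List Char → List Int
  | _, [] => []
  | cur, c :: t => cur :: pvVals (cur + pvDlt c) t

-- positions (from s) at which the value list hits m
def pvPickv : Int → Int → List Int → List Int
  | _, _, [] => []
  | s, m, v :: vs => (if v = m then [s] else []) ++ pvPickv (s + 1) m vs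

theorem pv_slice_one (cs : List Char) (k : Nat) :
    PySem.List.slice? cs none (some (k : Int)) 1 = some (cs.take k) := by
  have hfm : ∀ m : Nat, List.filterMap (fun x => cs[x]?) (List.range m) = cs.take m := by
    intro m; induction m with
    | zero => simp
    | succ m ih =>
      simp only [List.range_succ, List.filterMap_append, ih, List.filterMap_cons,
        List.filterMap_nil, List.take_add_one]
      cases cs[m]? <;> simp
  simp [PySem.List.slice?, PySem.List.sliceIndices]
  rw [if_neg (by omega : ¬ ((k : Int) < 0))]
  have h1 : (min (k : Int) (cs.length : Int)).toNat = min k cs.length := by omega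
  rw [h1, hfm]
  split_ifs with h
  · exact List.take_eq_take_min.symm
  · have : min k cs.length = 0 := by omega
    rcases Nat.min_eq_zero_iff.mp this with h0 | h0
    · simp [h0]
    · simp [List.length_eq_zero_iff.mp h0]

theorem pv_compute_skew_eq (l : List Char) : compute_skew (String.ofList l) = pvSk l := by
  have key : ∀ (l : List Char) (a b : Int),
      (l.foldl (fun (p : Int × Int) c =>
        (if c = 'C' then p.1 + 1 else p.1, if c = 'G' then p.2 + 1 else p.2)) (a, b)).2
      - (l.foldl (fun (p : Int × Int) c =>
        (if c = 'C' then p.1 + 1 else p.1, if c = 'G' then p.2 + 1 else p.2)) (a, b)).1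
      = b - a + pvSk l := by
    intro l; induction l with
    | nil => intro a b; simp [pvSk]
    | cons c t ih =>
      intro a b
      simp only [List.foldl_cons, ih, pvSk, List.map_cons, List.sum_cons, pvDlt]
      split_ifs <;> ring
  simp only [compute_skew, PySem.Str.len_eq, String.toList_ofList]
  rw [PySem.List.foldl_pyRange_zero_pyGetD' l ' '
    (fun (p : Int × Int) c => (if c = 'C' then p.1 + 1 else p.1, if c = 'G' then p.2 + 1 else p.2)) (0, 0)]
  simpa using key l 0 0

theorem pv_vals_eq (cs : List Char) : ∀ cur : Int,
    pvVals cur cs = (List.range cs.length).map (fun k => cur + pvSk (cs.take k)) := by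
  induction cs with
  | nil => intro cur; simp [pvVals]
  | cons c t ih =>
    intro cur
    rw [show pvVals cur (c :: t) = cur :: pvVals (cur + pvDlt c) t from rfl, ih,
      List.length_cons, List.range_succ_eq_map, List.map_cons, List.map_map]
    congr 1
    · simp [pvSk]
    · apply List.map_congr_left
      intro k _
      simp [pvSk, pvDlt]
      ring

theorem pv_skewlist_eq (cs : List Char) :
    (PySem.List.pyRange 0 ((cs.length : Int))).map
      (fun i => compute_skew (String.ofList ((PySem.List.slice? cs none (some i) 1).getD [])))
      = pvVals 0 cs := by
  rw [PySem.List.pyRange_zero_nat, List.map_map, pv_vals_eq]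
  apply List.map_congr_left
  intro k _
  simp [pv_slice_one, pv_compute_skew_eq]

theorem pv_pickv_eq_filter (m : Int) : ∀ (vs : List Int) (s : Int),
    pvPickv s m vs
      = ((List.range vs.length).filter (fun k => decide (vs.getD k 0 = m))).map (fun (k : Nat) => s + (k : Int)) := by
  intro vs; induction vs with
  | nil => intro s; simp [pvPickv]
  | cons v vs ih =>
    intro s
    have hmap : ∀ l : List Nat, List.map ((fun (k : Nat) => s + (k : Int)) ∘ Nat.succ) l
        = List.map (fun (k : Nat) => (s + 1) + (k : Int)) l := by
      intro l; apply List.map_congr_left; intro k _; simp; ring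
    have hpred : ((fun k => decide ((v :: vs).getD k 0 = m)) ∘ Nat.succ)
        = (fun k => decide (vs.getD k 0 = m)) := by
      funext k; simp
    rw [pvPickv, ih (s + 1), List.length_cons, List.range_succ_eq_map, List.filter_cons,
      List.filter_map, hpred]
    by_cases hv : v = m
    · rw [if_pos hv, if_pos (by simp [hv]), List.map_cons, List.map_map, hmap]
      simp
    · rw [if_neg hv, if_neg (by simp [hv]), List.map_map, hmap]
      simp

theorem pv_run_eq : ∀ (t : List Char) (s cur best : Int) (pos : List Int),
    ((PySem.List.enumerate t s).foldl
      (fun (st : Int × Int × List Int) p =>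
        let bp :=
          if st.1 < st.2.1 then (st.1, [p.1])
          else if st.1 = st.2.1 then (st.2.1, st.2.2 ++ [p.1])
          else st.2
        (st.1 + ((if p.2 = 'G' then (1:Int) else 0) - (if p.2 = 'C' then 1 else 0)), bp))
      (cur, best, pos)).2.2
    = (if (pvVals cur t).foldl min best < best then [] else pos)
        ++ pvPickv s ((pvVals cur t).foldl min best) (pvVals cur t) := by
  intro t; induction t with
  | nil => intro s cur best pos; simp [pvVals, pvPickv]
  | cons c t ih =>
    intro s cur best pos
    rw [PySem.List.enumerate_cons, List.foldl_cons]
    have hvals : pvVals cur (c :: t) = cur :: pvVals (cur + pvDlt c) t := rfl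
    have hfold : (pvVals cur (c :: t)).foldl min best
        = (pvVals (cur + pvDlt c) t).foldl min (min best cur) := by
      rw [hvals]; rfl
    by_cases h1 : cur < best
    · have hmin : min best cur = cur := by omega
      simp only [if_pos h1]
      rw [ih (s + 1) (cur + ((if c = 'G' then (1:Int) else 0) - (if c = 'C' then 1 else 0))) cur [s]]
      have hdl : cur + ((if c = 'G' then (1:Int) else 0) - (if c = 'C' then 1 else 0)) = cur + pvDlt c := rfl
      rw [hdl, hfold, hmin]
      set M := (pvVals (cur + pvDlt c) t).foldl min cur with hM
      have hMle : M ≤ cur := (PySem.List.foldl_min_le _ _).1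
      rw [hvals]
      show (if M < cur then [] else [s]) ++ pvPickv (s + 1) M (pvVals (cur + pvDlt c) t)
        = (if M < best then [] else pos)
          ++ ((if cur = M then [s] else []) ++ pvPickv (s + 1) M (pvVals (cur + pvDlt c) t))
      rw [if_pos (by omega : M < best)]
      by_cases hc : M < cur
      · rw [if_pos hc, if_neg (by omega : ¬ cur = M)]; simp
      · rw [if_neg hc, if_pos (by omega : cur = M)]; simp
    · by_cases h2 : cur = best
      · have hmin : min best cur = best := by omega
        simp only [if_neg h1, if_pos h2]
        rw [ih (s + 1) (cur + ((if c = 'G' then (1:Int) else 0) - (if c = 'C' then 1 else 0))) best (pos ++ [s])]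
        have hdl : cur + ((if c = 'G' then (1:Int) else 0) - (if c = 'C' then 1 else 0)) = cur + pvDlt c := rfl
        rw [hdl, hfold, hmin]
        set M := (pvVals (cur + pvDlt c) t).foldl min best with hM
        have hMle : M ≤ best := (PySem.List.foldl_min_le _ _).1
        rw [hvals]
        show (if M < best then [] else pos ++ [s]) ++ pvPickv (s + 1) M (pvVals (cur + pvDlt c) t)
          = (if M < best then [] else pos)
            ++ ((if cur = M then [s] else []) ++ pvPickv (s + 1) M (pvVals (cur + pvDlt c) t))
        by_cases hc : M < best
        · rw [if_pos hc, if_pos hc, if_neg (by omega : ¬ cur = M)]; simp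
        · rw [if_neg hc, if_neg hc, if_pos (by omega : cur = M)]; simp
      · have h3 : best < cur := by omega
        have hmin : min best cur = best := by omega
        simp only [if_neg h1, if_neg h2]
        rw [ih (s + 1) (cur + ((if c = 'G' then (1:Int) else 0) - (if c = 'C' then 1 else 0))) best pos]
        have hdl : cur + ((if c = 'G' then (1:Int) else 0) - (if c = 'C' then 1 else 0)) = cur + pvDlt c := rfl
        rw [hdl, hfold, hmin]
        set M := (pvVals (cur + pvDlt c) t).foldl min best with hM
        have hMle : M ≤ best := (PySem.List.foldl_min_le _ _).1
        rw [hvals]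
        show (if M < best then [] else pos) ++ pvPickv (s + 1) M (pvVals (cur + pvDlt c) t)
          = (if M < best then [] else pos)
            ++ ((if cur = M then [s] else []) ++ pvPickv (s + 1) M (pvVals (cur + pvDlt c) t))
        rw [if_neg (by omega : ¬ cur = M)]
        simp

-- ===== VERDICT (by name: the statement is the Claim_ definition above) =====
theorem find_min_skew_positions_spec : Claim_equal_find_min_skew_positions := by
  unfold Claim_equal_find_min_skew_positions
  intro text _ hpre
  unfold Pre_find_min_skew_positions at hpre
  unfold Spec_find_min_skew_positions
  obtain ⟨c, rest, hcs⟩ : ∃ c rest, text.toList = c :: rest := by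
    cases h : text.toList with
    | nil => exact absurd h hpre
    | cons c rest => exact ⟨c, rest, rfl⟩
  simp only [find_min_skew_positions, find_min_skew_positions_alt, PySem.Str.len_eq]
  simp only [hcs]
  rw [pv_skewlist_eq]
  rw [pv_run_eq]
  rw [show pvVals 0 (c :: rest) = 0 :: pvVals (0 + pvDlt c) rest from rfl]
  rw [PySem.List.min?_id_cons]
  rw [show ((0 : Int) :: pvVals (0 + pvDlt c) rest).foldl min 0
      = (pvVals (0 + pvDlt c) rest).foldl min 0 by simp]
  set M := (pvVals (0 + pvDlt c) rest).foldl min 0 with hM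
  show List.foldl (fun acc i => if PySem.List.pyGetD ((0:Int) :: pvVals (0 + pvDlt c) rest) i 0 = M then acc ++ [i] else acc)
      [] (PySem.List.pyRange 0 ((((0:Int) :: pvVals (0 + pvDlt c) rest).length : Nat) : Int))
    = (if M < 0 then [] else []) ++ pvPickv 0 M ((0:Int) :: pvVals (0 + pvDlt c) rest)
  rw [PySem.List.foldl_append_ite_eq_filter (p := fun i =>
    PySem.List.pyGetD ((0 : Int) :: pvVals (0 + pvDlt c) rest) i 0 = M)]
  rw [pv_pickv_eq_filter, PySem.List.pyRange_zero_nat, List.filter_map]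
  simp only [ite_self, List.nil_append]
  have hflt :
      List.filter ((fun x => decide (PySem.List.pyGetD ((0:Int) :: pvVals (0 + pvDlt c) rest) x 0 = M)) ∘ fun (k : Nat) => (k : Int))
          (List.range ((0:Int) :: pvVals (0 + pvDlt c) rest).length)
        = List.filter (fun k => decide (((0:Int) :: pvVals (0 + pvDlt c) rest).getD k 0 = M))
          (List.range ((0:Int) :: pvVals (0 + pvDlt c) rest).length) := by
    apply List.filter_congr; intro k _; simp
  rw [hflt]
  apply List.map_congr_left; intro k _; simp

@[simp] theorem find_min_skew_positions_raises : Claim_raises_find_min_skew_positions := by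
  unfold Claim_raises_find_min_skew_positions
  constructor
  · intro text _ hr hp
    exact hp hr
  · exact ⟨by decide, by decide, by decide⟩
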